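-- pv_equiv track=rewrite | github.com/learnerofmuses/slotMachine | 152Spr13/test2p2.py | something
-- ===== SOURCE A (Python) =====
-- def guess(word, letter):
-- 	count = 0
-- 	for i in range(len(word)):
-- 		if(word[i]==letter):
-- 			count = count + 1
--
-- 	return count
--
-- def something(my_list, letter):
-- 	m = guess(my_list[0], letter)
-- 	place = 0
-- 	for i in range(1, len(my_list)):
-- 		count = guess(my_list[i], letter)
-- 		if (count > m):
-- 			m = count
-- 			place = i
-- 	return m, place
-- ===== SOURCE B (Python) =====
-- def something(my_list, letter):
--     counts = [sum(1 for ch in word if ch == letter) for word in my_list]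
--     m = max(counts)
--     return m, counts.index(m)
-- ===== Notes on version B (the rewrite author's own statement) =====
-- stated objective: alternative
-- what changed: A fuses counting, running-max and position tracking into one indexed sweep; B first builds the full table of per-word counts, then finds the maximum with max() and locates it with list.index().
import Mathlib
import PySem

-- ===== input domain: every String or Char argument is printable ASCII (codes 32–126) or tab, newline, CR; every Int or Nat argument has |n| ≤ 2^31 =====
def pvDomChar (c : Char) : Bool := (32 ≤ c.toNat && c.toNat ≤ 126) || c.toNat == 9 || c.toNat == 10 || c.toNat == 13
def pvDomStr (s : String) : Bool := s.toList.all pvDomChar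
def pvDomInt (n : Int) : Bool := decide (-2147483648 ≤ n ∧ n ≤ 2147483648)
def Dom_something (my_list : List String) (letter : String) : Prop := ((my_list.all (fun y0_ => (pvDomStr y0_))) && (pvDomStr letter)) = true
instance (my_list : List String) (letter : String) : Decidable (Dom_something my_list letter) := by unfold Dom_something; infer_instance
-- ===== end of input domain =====

-- B replaces A's fused single sweep (count + running max + position tracking) by a
-- build-table / max / index decomposition; return values agree on every nonempty list.

-- ===== PORT A =====
-- guess(word, letter): count positions i with word[i] == letter (word[i] is a 1-char string)
def pvGuess (word letter : String) : Int :=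
  (PySem.List.pyRange 0 (PySem.Str.len word) 1).foldl
    (fun count i =>
      if String.ofList [PySem.List.pyGetD word.toList i ' '] = letter then count + 1 else count)
    0

def something (my_list : List String) (letter : String) : Int × Int :=
  let m0 := pvGuess (PySem.List.pyGetD my_list 0 "") letter
  (PySem.List.pyRange 1 (my_list.length : Int) 1).foldl
    (fun (mp : Int × Int) i =>
      let count := pvGuess (PySem.List.pyGetD my_list i "") letter
      if count > mp.1 then (count, i) else mp)
    (m0, 0)

-- ===== PORT B =====
-- sum(1 for ch in word if ch == letter)
def pvCountB (word letter : String) : Int :=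
  ((word.toList.filter (fun ch => String.ofList [ch] = letter)).length : Int)

def something_alt (my_list : List String) (letter : String) : Int × Int :=
  let counts := my_list.map (fun word => pvCountB word letter)
  let m := (PySem.List.max? counts (fun x => x)).getD 0
  (m, (((PySem.List.index? counts m).getD 0 : Nat) : Int))

-- ===== PRECONDITION & SPEC =====
-- Pre_ excludes the empty list, on which A raises IndexError (my_list[0]) and B raises ValueError (max([])).
def Pre_something (my_list : List String) (letter : String) : Prop := my_list ≠ []
instance (my_list : List String) (letter : String) : Decidable (Pre_something my_list letter) := by unfold Pre_something; infer_instance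
def pvWitness_something : List String × String := (["abc", "bb"], "b")
def Spec_something (my_list : List String) (letter : String) (out : Int × Int) : Prop := out = something_alt my_list letter
instance (my_list : List String) (letter : String) (out : Int × Int) : Decidable (Spec_something my_list letter out) := by unfold Spec_something; infer_instance

-- ===== CLAIM (what is proved, stated in full; the proofs are below) =====
def Claim_equal_something : Prop := ∀ (my_list : List String) (letter : String), Dom_something my_list letter → Pre_something my_list letter → Spec_something my_list letter (something my_list letter)

-- ===== LEMMAS AND PROOFS =====

-- counting loop = filter length
theorem pv_count_fold (letter : String) (l : List Char) (n : Int) :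
    l.foldl (fun count c => if String.ofList [c] = letter then count + 1 else count) n
      = n + ((l.filter (fun ch => String.ofList [ch] = letter)).length : Int) := by
  induction l generalizing n with
  | nil => simp
  | cons c l ih =>
    simp only [List.foldl_cons, List.filter_cons]
    by_cases h : String.ofList [c] = letter <;> simp [h, ih] <;> push_cast <;> ring

theorem pvGuess_eq (word letter : String) : pvGuess word letter = pvCountB word letter := by
  unfold pvGuess pvCountB
  rw [PySem.Str.len_eq]
  rw [PySem.List.foldl_pyRange_zero_pyGetD' word.toList ' '
    (fun count c => if String.ofList [c] = letter then count + 1 else count) 0]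
  rw [pv_count_fold]
  simp

-- A's main loop, rephrased as structural recursion over the remaining words
def pvRun (g : String → Int) (mp : Int × Int) (ys : List String) (i : Int) : Int × Int :=
  match ys with
  | [] => mp
  | y :: ys =>
    let c := g y
    if c > mp.1 then pvRun g (c, i) ys (i + 1) else pvRun g mp ys (i + 1)

theorem pv_loopA (g : String → Int) :
    ∀ (ys : List String) (L : List String) (a : Int) (mp : Int × Int),
    0 ≤ a → L.drop a.toNat = ys →
    (PySem.List.pyRange a (L.length : Int) 1).foldl
      (fun (mp : Int × Int) i =>
        if g (PySem.List.pyGetD L i "") > mp.1 then (g (PySem.List.pyGetD L i ""), i) else mp) mp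
      = pvRun g mp ys a := by
  intro ys
  induction ys with
  | nil =>
    intro L a mp ha hdrop
    have hlen : L.length ≤ a.toNat := by
      by_contra h
      have := List.drop_eq_nil_iff.mp hdrop
      omega
    rw [PySem.List.pyRange_one_eq_nil (by omega)]
    rfl
  | cons y ys ih =>
    intro L a mp ha hdrop
    have hlt : a.toNat < L.length := by
      by_contra h
      rw [List.drop_eq_nil_of_le (by omega)] at hdrop
      simp at hdrop
    have haL : a < (L.length : Int) := by omega
    have hget : PySem.List.pyGetD L a "" = y := by
      have h1 : L[a.toNat]? = some y := by
        rw [← List.head?_drop, hdrop]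
        rfl
      rw [PySem.List.pyGetD_of_nonneg (i := a) (d := "") (xs := L) ha]
      simp [List.getD, h1]
    have hdrop' : L.drop (a + 1).toNat = ys := by
      have h1 : (a + 1).toNat = a.toNat + 1 := by omega
      rw [h1, ← List.tail_drop, hdrop]
      rfl
    rw [PySem.List.pyRange_one_cons haL, List.foldl_cons, hget]
    by_cases hc : g y > mp.1
    · rw [if_pos hc, ih L (a + 1) (g y, a) (by omega) hdrop']
      simp [pvRun, hc]
    · rw [if_neg hc, ih L (a + 1) mp (by omega) hdrop']
      simp [pvRun, hc]

-- pvRun computes (running max, place): max over all, and the first strictly-improving index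
theorem pvRun_spec (g : String → Int) :
    ∀ (ys : List String) (m p i : Int),
    pvRun g (m, p) ys i =
      ((ys.map g).foldl max m,
       if (ys.map g).foldl max m = m then p
       else i + (((PySem.List.index? (ys.map g) ((ys.map g).foldl max m)).getD 0 : Nat) : Int)) := by
  intro ys
  induction ys with
  | nil => intro m p i; simp [pvRun]
  | cons y ys ih =>
    intro m p i
    have hmono : ∀ (a : Int), a ≤ (ys.map g).foldl max a :=
      fun a => (PySem.List.le_foldl_max (ys.map g) a).1
    simp only [pvRun, List.map_cons, List.foldl_cons]
    by_cases hc : g y > m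
    · rw [if_pos hc, ih]
      have hmc : max m (g y) = g y := by omega
      rw [hmc]
      have hM : g y ≤ (ys.map g).foldl max (g y) := hmono (g y)
      have hMm : (ys.map g).foldl max (g y) ≠ m := by omega
      rw [if_neg hMm]
      by_cases he : (ys.map g).foldl max (g y) = g y
      · rw [if_pos he, he, PySem.List.index?_cons_self]
        simp
      · rw [if_neg he]
        have hne : g y ≠ (ys.map g).foldl max (g y) := fun h => he h.symm
        rw [PySem.List.index?_cons_of_ne _ hne]
        have hmem : (ys.map g).foldl max (g y) ∈ ys.map g := by
          rcases PySem.List.foldl_max_mem (ys.map g) (g y) with h | h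
          · exact absurd h he
          · exact h
        rcases (PySem.List.index?_isSome_iff (ys.map g) _).mpr hmem with h
        rcases Option.isSome_iff_exists.mp h with ⟨k, hk⟩
        rw [hk]
        simp
        push_cast
        ring
    · rw [if_neg hc, ih]
      have hmc : max m (g y) = m := by omega
      rw [hmc]
      by_cases he : (ys.map g).foldl max m = m
      · rw [if_pos he, if_pos he]
      · rw [if_neg he, if_neg he]
        have hgm : g y ≤ m := by omega
        have hM : m ≤ (ys.map g).foldl max m := hmono m
        have hne : g y ≠ (ys.map g).foldl max m := by omega
        rw [PySem.List.index?_cons_of_ne _ hne]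
        have hmem : (ys.map g).foldl max m ∈ ys.map g := by
          rcases PySem.List.foldl_max_mem (ys.map g) m with h | h
          · exact absurd h he
          · exact h
        rcases Option.isSome_iff_exists.mp ((PySem.List.index?_isSome_iff (ys.map g) _).mpr hmem) with ⟨k, hk⟩
        rw [hk]
        simp
        push_cast
        ring

-- ===== VERDICT (by name: the statement is the Claim_ definition above) =====
theorem something_spec : Claim_equal_something := by
  intro my_list letter _hdom hpre
  unfold Spec_something
  match my_list with
  | [] => exact absurd rfl hpre
  | w :: ws =>
    have hA : something (w :: ws) letter
        = pvRun (fun word => pvGuess word letter) (pvGuess w letter, 0) ws 1 := by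
      have hget0 : PySem.List.pyGetD (w :: ws) 0 "" = w := by
        rw [PySem.List.pyGetD_of_nonneg (i := (0:Int)) (d := "") (xs := w :: ws) (by omega)]
        rfl
      have h0 : something (w :: ws) letter
          = (PySem.List.pyRange 1 (((w :: ws).length : Nat) : Int) 1).foldl
              (fun (mp : Int × Int) i =>
                if pvGuess (PySem.List.pyGetD (w :: ws) i "") letter > mp.1
                then (pvGuess (PySem.List.pyGetD (w :: ws) i "") letter, i) else mp)
              (pvGuess (PySem.List.pyGetD (w :: ws) 0 "") letter, 0) := rfl
      rw [h0, hget0, pv_loopA (fun word => pvGuess word letter) ws (w :: ws) 1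
            (pvGuess w letter, 0) (by omega) (by simp)]
    rw [hA, pvRun_spec]
    have hgmap : ws.map (fun word => pvGuess word letter)
        = ws.map (fun word => pvCountB word letter) := by simp [pvGuess_eq]
    rw [hgmap, pvGuess_eq]
    unfold something_alt
    set cs := ws.map (fun word => pvCountB word letter) with hcs
    set c0 := pvCountB w letter with hc0
    have hmap : (w :: ws).map (fun word => pvCountB word letter) = c0 :: cs := by
      simp [hcs, hc0]
    simp only [hmap]
    have hmax : PySem.List.max? (c0 :: cs) (fun x => x) = some (cs.foldl max c0) :=
      PySem.List.max?_id_cons c0 cs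
    simp only [hmax, Option.getD_some]
    by_cases he : cs.foldl max c0 = c0
    · rw [if_pos he, he, PySem.List.index?_cons_self]
      simp
    · rw [if_neg he]
      have hne : c0 ≠ cs.foldl max c0 := fun h => he h.symm
      rw [PySem.List.index?_cons_of_ne _ hne]
      have hmem : cs.foldl max c0 ∈ cs := by
        rcases PySem.List.foldl_max_mem cs c0 with h | h
        · exact absurd h he
        · exact h
      rcases Option.isSome_iff_exists.mp ((PySem.List.index?_isSome_iff cs _).mpr hmem) with ⟨k, hk⟩
      rw [hk]
      simp
      push_cast
      ring
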